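-- pv_equiv track=rewrite | github.com/dudarev/coartintator | coartintator/markdown/__init__.py | remove_sections
-- ===== SOURCE A (Python) =====
-- def _get_title_and_level(line: str) -> tuple[str, int]:
--     """
--     Given a markdown line, return the title.
--     """
--     if not line:
--         return "", 0
--     level = 0
--     while line[level] == "#":
--         level += 1
--     if level == 0:
--         return "", 0
--     return line[level + 1 :].strip(), level
--
-- def remove_sections(text: str, titles: list[str]) -> str:
--     """
--     Remove sections from a markdown text.
--
--     For example, given the following markdown text:
--
--     # Title 1
--     Some content
--     ## Title 2
--     More content
--     ## Title 3
--     Even more content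
--
--     If we call `remove_sections(text, ["Title 2", "Title 3"])`, we should get:
--
--     # Title 1
--     Some content
--     """
--     lines = text.split("\n")
--     res = []
--     skip = False
--     level_to_skip = 0
--     for line in lines:
--         title, level = _get_title_and_level(line)
--         if skip and level > 0 and level <= level_to_skip:
--             skip = False
--             level_to_skip = 0
--         if level == 0 and skip:
--             continue
--         if level > 0 and title in titles:
--             skip = True
--             level_to_skip = level
--         if not skip:
--             res.append(line)
--     return "\n".join(res).strip()
-- ===== SOURCE B (Python) =====
-- def _get_title_and_level(line: str) -> tuple[str, int]:
--     """
--     Given a markdown line, return the title.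
--     """
--     if not line:
--         return "", 0
--     level = 0
--     while line[level] == "#":
--         level += 1
--     if level == 0:
--         return "", 0
--     return line[level + 1 :].strip(), level
--
--
-- def remove_sections(text: str, titles: list[str]) -> str:
--     """Remove sections whose headings match the given titles.
--
--     Index walk: on a matching heading, an inner loop consumes the whole
--     section (stopping at, but not consuming, the next heading of the same
--     or higher level); a deeper matching heading inside the skipped region
--     extends the skip level.
--     """
--     lines = text.split("\n")
--     res = []
--     i = 0
--     n = len(lines)
--     while i < n:
--         title, level = _get_title_and_level(lines[i])
--         if level > 0 and title in titles:
--             skip_level = level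
--             i += 1
--             while i < n:
--                 t2, l2 = _get_title_and_level(lines[i])
--                 if 0 < l2 <= skip_level:
--                     break
--                 if l2 > 0 and t2 in titles:
--                     skip_level = l2
--                 i += 1
--         else:
--             res.append(lines[i])
--             i += 1
--     return "\n".join(res).strip()
-- ===== Notes on version B (the rewrite author's own statement) =====
-- stated objective: alternative
-- what changed: Replaced the cross-iteration skip/level_to_skip flag machine with an explicit index walk: a matched heading triggers a nested inner loop that consumes the whole section up to (but not consuming) the next heading of the same or higher level.
import Mathlib
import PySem

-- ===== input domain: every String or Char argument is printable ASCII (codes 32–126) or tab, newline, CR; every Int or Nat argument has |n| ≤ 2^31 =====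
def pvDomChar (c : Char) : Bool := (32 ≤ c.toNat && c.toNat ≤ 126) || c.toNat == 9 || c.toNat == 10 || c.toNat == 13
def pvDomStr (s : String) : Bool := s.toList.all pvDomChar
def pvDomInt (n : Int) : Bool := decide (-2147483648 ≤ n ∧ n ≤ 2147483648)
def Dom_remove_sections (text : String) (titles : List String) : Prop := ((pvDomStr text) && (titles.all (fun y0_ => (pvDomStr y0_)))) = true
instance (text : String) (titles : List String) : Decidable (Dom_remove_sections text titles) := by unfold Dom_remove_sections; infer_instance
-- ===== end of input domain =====

-- B replaces A's cross-iteration skip/level flag machine with an index walk whose nested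
-- inner loop consumes each matched section (alternative decomposition, same cost).
-- Both programs raise IndexError on a nonempty line consisting only of '#'; Pre_ excludes those.

-- ===== PORT A =====
-- the `while line[level] == "#"` loop of _get_title_and_level (total here; Python raises
-- on an all-'#' nonempty line, which Pre_ excludes)
def pvHashes : List Char → Nat
  | '#' :: cs => pvHashes cs + 1
  | _ => 0

-- _get_title_and_level, shared verbatim by A and B (B's Python reuses it unchanged)
def pvGtl (line : List Char) : List Char × Int :=
  if line = [] then ([], 0)
  else
    let level := pvHashes line
    if level = 0 then ([], 0)
    else (PySem.Chars.strip (PySem.Chars.slice line (some ((level : Int) + 1)) none), (level : Int))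

-- one iteration of A's for-loop: state = (res, skip, level_to_skip)
def pvStepA (tl : List (List Char)) (st : List (List Char) × Bool × Int) (line : List Char) :
    List (List Char) × Bool × Int :=
  let res := st.1
  let skip := st.2.1
  let lts := st.2.2
  let p := pvGtl line
  let skip1 := if skip = true ∧ 0 < p.2 ∧ p.2 ≤ lts then false else skip
  let lts1 := if skip = true ∧ 0 < p.2 ∧ p.2 ≤ lts then 0 else lts
  if p.2 = 0 ∧ skip1 = true then (res, skip1, lts1)
  else
    let skip2 := if 0 < p.2 ∧ p.1 ∈ tl then true else skip1
    let lts2 := if 0 < p.2 ∧ p.1 ∈ tl then p.2 else lts1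
    if skip2 = false then (res ++ [line], skip2, lts2) else (res, skip2, lts2)

def remove_sections (text : String) (titles : List String) : String :=
  let tl := titles.map String.toList
  let lines := PySem.Chars.splitOn text.toList "\n".toList
  let st := lines.foldl (pvStepA tl) (([] : List (List Char)), false, (0 : Int))
  String.ofList (PySem.Chars.strip (PySem.Chars.join "\n".toList st.1))

-- ===== PORT B =====
-- B's inner while loop: consume lines until the next heading of level ≤ L (not consumed);
-- a deeper matching heading inside extends the skip level
def pvSkipSec (tl : List (List Char)) (L : Int) : List (List Char) → List (List Char)
  | [] => []
  | l :: rest =>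
    let p := pvGtl l
    if 0 < p.2 ∧ p.2 ≤ L then l :: rest
    else pvSkipSec tl (if 0 < p.2 ∧ p.1 ∈ tl then p.2 else L) rest

theorem pvSkipSec_length_le (tl : List (List Char)) :
    ∀ (L : Int) (xs : List (List Char)), (pvSkipSec tl L xs).length ≤ xs.length := by
  intro L xs
  induction xs generalizing L with
  | nil => simp [pvSkipSec]
  | cons l rest ih =>
    simp only [pvSkipSec]
    split
    · exact le_refl _
    · exact Nat.le_succ_of_le (ih _)

-- B's outer while loop over the line index
def pvWalk (tl : List (List Char)) : List (List Char) → List (List Char)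
  | [] => []
  | l :: rest =>
    let p := pvGtl l
    if 0 < p.2 ∧ p.1 ∈ tl then pvWalk tl (pvSkipSec tl p.2 rest)
    else l :: pvWalk tl rest
termination_by xs => xs.length
decreasing_by
  · exact Nat.lt_succ_of_le (pvSkipSec_length_le tl _ rest)
  · simp

def remove_sections_alt (text : String) (titles : List String) : String :=
  let tl := titles.map String.toList
  let lines := PySem.Chars.splitOn text.toList "\n".toList
  String.ofList (PySem.Chars.strip (PySem.Chars.join "\n".toList (pvWalk tl lines)))

-- ===== PRECONDITION & SPEC =====
-- Pre_ excludes exactly the inputs where A (and B alike) raises IndexError: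
-- texts with a nonempty line consisting only of '#' characters.
def Pre_remove_sections (text : String) (titles : List String) : Prop :=
  ∀ l ∈ PySem.Chars.splitOn text.toList "\n".toList, l ≠ [] → l.any (fun c => c != '#') = true
instance (text : String) (titles : List String) : Decidable (Pre_remove_sections text titles) := by
  unfold Pre_remove_sections; infer_instance

def pvWitness_remove_sections : String × List String :=
  ("# A\nx", ["A"])

def Spec_remove_sections (text : String) (titles : List String) (out : String) : Prop :=
  out = remove_sections_alt text titles
instance (text : String) (titles : List String) (out : String) : Decidable (Spec_remove_sections text titles out) := by
  unfold Spec_remove_sections; infer_instance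

-- ===== CLAIM (what is proved, stated in full; the proofs are below) =====
def Claim_equal_remove_sections : Prop := ∀ (text : String) (titles : List String), Dom_remove_sections text titles → Pre_remove_sections text titles → Spec_remove_sections text titles (remove_sections text titles)

-- ===== LEMMAS AND PROOFS =====

-- Invariant: A's fold from a non-skipping state produces walk's output;
-- from a skipping state with level L it produces walk's output after the section is consumed.
theorem pvFold_walk (tl : List (List Char)) (lines : List (List Char)) :
    (∀ res, (List.foldl (pvStepA tl) (res, false, (0 : Int)) lines).1 = res ++ pvWalk tl lines) ∧
    (∀ res L, (List.foldl (pvStepA tl) (res, true, L) lines).1 =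
        res ++ pvWalk tl (pvSkipSec tl L lines)) := by
  induction lines with
  | nil => simp [pvWalk, pvSkipSec]
  | cons l rest ih =>
    have hstep_false : ∀ res : List (List Char),
        pvStepA tl (res, false, (0 : Int)) l =
          if 0 < (pvGtl l).2 ∧ (pvGtl l).1 ∈ tl then (res, true, (pvGtl l).2)
          else (res ++ [l], false, 0) := by
      intro res
      by_cases h : 0 < (pvGtl l).2 ∧ (pvGtl l).1 ∈ tl
      · simp [pvStepA, h]
      · simp [pvStepA, h]
    have hfalse : ∀ res, (List.foldl (pvStepA tl) (res, false, (0 : Int)) (l :: rest)).1 =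
        res ++ pvWalk tl (l :: rest) := by
      intro res
      rw [List.foldl_cons, hstep_false]
      by_cases h : 0 < (pvGtl l).2 ∧ (pvGtl l).1 ∈ tl
      · rw [if_pos h, ih.2 res (pvGtl l).2, pvWalk]
        simp [h]
      · rw [if_neg h, ih.1 (res ++ [l]), pvWalk]
        simp [h]
    refine ⟨hfalse, ?_⟩
    intro res L
    by_cases hb : 0 < (pvGtl l).2 ∧ (pvGtl l).2 ≤ L
    · -- boundary heading: skip turns off and the same line is reprocessed from the fresh state
      have hstep : pvStepA tl (res, true, L) l = pvStepA tl (res, false, (0 : Int)) l := by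
        simp [pvStepA, hb]
      rw [List.foldl_cons, hstep, ← List.foldl_cons]
      rw [hfalse res]
      have : pvSkipSec tl L (l :: rest) = l :: rest := by
        simp [pvSkipSec, hb]
      rw [this]
    · -- inside the skipped section: the line is dropped, the level may be extended
      have hstep : pvStepA tl (res, true, L) l =
          (res, true, if 0 < (pvGtl l).2 ∧ (pvGtl l).1 ∈ tl then (pvGtl l).2 else L) := by
        by_cases h : 0 < (pvGtl l).2 ∧ (pvGtl l).1 ∈ tl
        · simp [pvStepA, h]
          intro h0
          exact absurd h0 (ne_of_gt h.1)
        · by_cases h0 : (pvGtl l).2 = 0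
          · simp [pvStepA, hb, h, h0]
          · simp [pvStepA, hb, h, h0]
      rw [List.foldl_cons, hstep, ih.2]
      have : pvSkipSec tl L (l :: rest) =
          pvSkipSec tl (if 0 < (pvGtl l).2 ∧ (pvGtl l).1 ∈ tl then (pvGtl l).2 else L) rest := by
        simp only [pvSkipSec]
        rw [if_neg hb]
      rw [this]

-- ===== VERDICT (by name: the statement is the Claim_ definition above) =====
theorem remove_sections_spec : Claim_equal_remove_sections := by
  intro text titles _ _
  unfold Spec_remove_sections remove_sections remove_sections_alt
  simp only []
  rw [(pvFold_walk (titles.map String.toList) (PySem.Chars.splitOn text.toList "\n".toList)).1 []]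
  rfl
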